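-- pv_equiv track=rewrite | github.com/sam-ng/Constraint-Satisfaction | Code/minconflicts.py | max_conflicts_variable
-- ===== SOURCE A (Python) =====
-- from operator import itemgetter
--
-- def max_conflicts_variable(assignment, matrix):
-- 	conflicted = [] # will hold a tuple with (conflicted var, conflict count)
-- 	for i in range(len(matrix)):
-- 		conflict_count = 0
-- 		for j in range(len(matrix[i])):
-- 			if matrix[i][j] == 1 and assignment[i] == assignment[j]:
-- 				conflict_count += 1
-- 		conflicted.append((i, conflict_count))
-- 	if len(conflicted) > 0:
-- 		var = max(conflicted, key=itemgetter(1))[0] # get the variable with the most conflicts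
-- 		return var
-- 	return -1
-- ===== SOURCE B (Python) =====
-- def max_conflicts_variable(assignment, matrix):
--     if not matrix:
--         return -1
--     # hash index: group variable indices by their assigned value, once
--     buckets = {}
--     for j, v in enumerate(assignment):
--         buckets.setdefault(v, []).append(j)
--     # per row, scan only the indices sharing the row's value
--     counts = []
--     for i in range(len(matrix)):
--         row = matrix[i]
--         n = len(row)
--         c = 0
--         for j in buckets[assignment[i]]:
--             if j < n and row[j] == 1:
--                 c += 1
--         counts.append(c)
--     # first index of the maximal count
--     return counts.index(max(counts))
-- ===== Notes on version B (the rewrite author's own statement) =====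
-- stated objective: alternative
-- what changed: Replaces A's per-row scan of the whole row with an equality test against every column's assignment by a hash index built once (value -> list of variable indices), so each row only scans the indices that share its value, counts are collected in a list, and the result is counts.index(max(counts)) instead of max over (var,count) pairs.
-- outside the precondition, e.g. on max_conflicts_variable([], [[0]]): A returns 0, B raises IndexError; on max_conflicts_variable([0], [[0], [0]]): A returns 0, B raises IndexError
import Mathlib
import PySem

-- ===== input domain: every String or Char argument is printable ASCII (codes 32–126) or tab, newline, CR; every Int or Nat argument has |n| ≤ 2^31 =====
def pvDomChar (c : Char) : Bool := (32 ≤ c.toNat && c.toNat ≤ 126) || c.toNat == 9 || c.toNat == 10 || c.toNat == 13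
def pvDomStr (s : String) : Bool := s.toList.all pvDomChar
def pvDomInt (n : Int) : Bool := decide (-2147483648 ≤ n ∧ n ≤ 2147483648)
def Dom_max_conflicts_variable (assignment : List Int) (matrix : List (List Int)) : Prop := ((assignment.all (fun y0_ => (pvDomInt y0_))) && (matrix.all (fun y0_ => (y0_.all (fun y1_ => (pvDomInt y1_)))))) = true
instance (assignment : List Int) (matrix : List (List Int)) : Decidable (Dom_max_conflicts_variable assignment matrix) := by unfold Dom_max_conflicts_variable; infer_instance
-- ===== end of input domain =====

-- B replaces A's full-row scan with assignment-equality tests by a hash index (value -> indices)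
-- built once, counts collected in a list, and counts.index(max(counts)) as the final selector
-- (objective: alternative algorithm, same asymptotic worst case).

-- ===== PORT A =====
def max_conflicts_variable (assignment : List Int) (matrix : List (List Int)) : Int :=
  let conflicted : List (Int × Int) :=
    (PySem.List.pyRange 0 (matrix.length : Int) 1).foldl
      (fun acc i =>
        let row := PySem.List.pyGetD matrix i []
        let conflict_count : Int :=
          (PySem.List.pyRange 0 (row.length : Int) 1).foldl
            (fun c j =>
              if PySem.List.pyGetD row j 0 = 1 ∧
                 PySem.List.pyGetD assignment i 0 = PySem.List.pyGetD assignment j 0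
              then c + 1 else c) 0
        acc ++ [(i, conflict_count)]) []
  if conflicted.length > 0 then
    match PySem.List.max? conflicted (fun p => p.2) with
    | some p => p.1
    | none => -1
  else -1

-- ===== PORT B =====
def max_conflicts_variable_alt (assignment : List Int) (matrix : List (List Int)) : Int :=
  if matrix = [] then -1
  else
    let buckets : PySem.Dict Int (List Int) :=
      (PySem.List.enumerate assignment).foldl
        (fun d p => d.modify p.2 [] (fun l => l ++ [p.1])) PySem.Dict.empty
    let counts : List Int :=
      (PySem.List.pyRange 0 (matrix.length : Int) 1).foldl
        (fun cs i =>
          let row := PySem.List.pyGetD matrix i []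
          let n : Int := (row.length : Int)
          let c : Int :=
            (buckets.getD (PySem.List.pyGetD assignment i 0) []).foldl
              (fun c j => if j < n ∧ PySem.List.pyGetD row j 0 = 1 then c + 1 else c) 0
          cs ++ [c]) []
    -- Python: counts.index(max(counts)); counts ≠ [] here and max(counts) ∈ counts,
    -- so the none branches (empty max / ValueError) are unreachable
    match PySem.List.max? counts (fun x => x) with
    | none => -1
    | some m =>
      match PySem.List.index? counts m with
      | none => -1
      | some k => (k : Int)

-- ===== PRECONDITION & SPEC =====
-- Pre_ excludes (a) the inputs where A raises IndexError (a 1-entry whose row or column index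
-- has no assignment) and (b) the remaining non-CSP shapes with len(matrix) > len(assignment):
-- there A returns only because the out-of-range rows happen to contain no 1-entry, while B's
-- per-row bucket lookup of assignment[i] raises; in the intended CSP use matrix is the n×n
-- adjacency matrix of the n assigned variables, so these shapes are outside the natural domain.
def Pre_max_conflicts_variable (assignment : List Int) (matrix : List (List Int)) : Prop :=
  matrix.length ≤ assignment.length ∧
  ∀ i < matrix.length, ∀ j < (matrix.getD i []).length,
    (matrix.getD i []).getD j 0 = 1 → j < assignment.length
instance (assignment : List Int) (matrix : List (List Int)) : Decidable (Pre_max_conflicts_variable assignment matrix) := by unfold Pre_max_conflicts_variable; infer_instance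
def pvWitness_max_conflicts_variable : List Int × List (List Int) :=
  ([0, 0, 1], [[0, 1, 0], [1, 0, 1], [0, 1, 0]])

def Spec_max_conflicts_variable (assignment : List Int) (matrix : List (List Int)) (out : Int) : Prop := out = max_conflicts_variable_alt assignment matrix
instance (assignment : List Int) (matrix : List (List Int)) (out : Int) : Decidable (Spec_max_conflicts_variable assignment matrix out) := by unfold Spec_max_conflicts_variable; infer_instance

-- ===== CLAIM (what is proved, stated in full; the proofs are below) =====
def Claim_equal_max_conflicts_variable : Prop := ∀ (assignment : List Int) (matrix : List (List Int)), Dom_max_conflicts_variable assignment matrix → Pre_max_conflicts_variable assignment matrix → Spec_max_conflicts_variable assignment matrix (max_conflicts_variable assignment matrix)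
-- ===== LEMMAS AND PROOFS =====

-- A's selection step on (index, count) pairs: keep the incumbent on ties
def pvStep (m x : Int × Int) : Int × Int := if m.2 < x.2 then x else m

-- max? over a nonempty list is the running-max fold from its head (first-wins)
theorem pvMax?_cons (p : Int × Int) (l : List (Int × Int)) :
    PySem.List.max? (p :: l) (fun q => q.2) = some (l.foldl pvStep p) := by
  unfold PySem.List.max?
  simp only [List.foldl_cons]
  induction l generalizing p with
  | nil => rfl
  | cons x t ih =>
      simp only [List.foldl_cons, pvStep]
      split_ifs <;> exact ih _

-- the running max is a member of seed-or-list
theorem pvFoldlMax_mem (t : List Int) (c : Int) :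
    t.foldl max c = c ∨ t.foldl max c ∈ t := by
  induction t generalizing c with
  | nil => exact Or.inl rfl
  | cons x t ih =>
      simp only [List.foldl_cons]
      rcases ih (max c x) with h | h
      · rw [h]
        rcases le_total c x with hcx | hcx
        · exact Or.inr (by simp [max_eq_right hcx])
        · exact Or.inl (max_eq_left hcx)
      · exact Or.inr (List.mem_cons_of_mem _ h)

-- idxOf? returns the idxOf of a member
theorem pvIdxOf?_of_mem (l : List Int) (m : Int) (h : m ∈ l) :
    List.idxOf? m l = some (List.idxOf m l) := by
  induction l with
  | nil => cases h
  | cons x t ih =>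
      by_cases hx : x = m
      · subst hx; simp [List.idxOf?_cons, List.idxOf_cons]
      · have hm : m ∈ t := by
          rcases List.mem_cons.mp h with h' | h'
          · exact absurd h'.symm hx
          · exact h'
        simp [List.idxOf?_cons, List.idxOf_cons, hx, ih hm]

-- core: A's running-max over enumerated counts lands on the first index of the maximum
theorem pvFoldF (t : List Int) (s j c : Int) :
    (List.foldl pvStep (j, c) (PySem.List.enumerate t s)).1 =
      if t.foldl max c ≤ c then j else s + ((List.idxOf (t.foldl max c) t : Nat) : Int) := by
  induction t generalizing s j c with
  | nil => simp [PySem.List.enumerate_nil]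
  | cons x t ih =>
      rw [PySem.List.enumerate_cons]
      simp only [List.foldl_cons]
      have hle := (PySem.List.le_foldl_max t x).1
      by_cases hcx : c < x
      · rw [show max c x = x from max_eq_right (le_of_lt hcx)]
        have hstep : pvStep (j, c) (s, x) = (s, x) := by simp [pvStep, hcx]
        rw [hstep, ih]
        by_cases hx : t.foldl max x ≤ x
        · have hmx : t.foldl max x = x := le_antisymm hx hle
          rw [hmx, if_pos le_rfl, if_neg (by omega : ¬ x ≤ c), List.idxOf_cons]
          simp
        · have hne : (x == t.foldl max x) = false := by
            simp only [beq_eq_false_iff_ne, ne_eq]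
            intro he
            exact hx (le_of_eq he.symm)
          rw [if_neg hx, if_neg (by omega : ¬ t.foldl max x ≤ c), List.idxOf_cons, hne]
          simp only [cond_false]
          omega
      · rw [show max c x = c from max_eq_left (by omega)]
        have hstep : pvStep (j, c) (s, x) = (j, c) := by simp [pvStep, hcx]
        rw [hstep, ih]
        by_cases hc : t.foldl max c ≤ c
        · rw [if_pos hc, if_pos hc]
        · have hne : (x == t.foldl max c) = false := by
            simp only [beq_eq_false_iff_ne, ne_eq]
            omega
          rw [if_neg hc, if_neg hc, List.idxOf_cons, hne]
          simp only [cond_false]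
          omega

-- counting a bounded predicate over two ranges that both contain its support
theorem pvCountP_range_of_le (p : Nat → Bool) (m n : Nat) (hmn : n ≤ m)
    (hp : ∀ k, p k = true → k < n) :
    (List.range m).countP p = (List.range n).countP p := by
  have hm : m = n + (m - n) := by omega
  rw [hm, List.range_add, List.countP_append]
  have h0 : (List.countP p (List.map (fun x => n + x) (List.range (m - n)))) = 0 := by
    rw [List.countP_eq_zero]
    intro a ha
    rcases List.mem_map.mp ha with ⟨k, _, rfl⟩
    intro hcon
    exact absurd (hp _ hcon) (by omega)
  omega

theorem pvCountP_range_congr (p q : Nat → Bool) (m n : Nat)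
    (hp : ∀ k, p k = true → k < n) (hq : ∀ k, q k = true → k < m)
    (hpq : ∀ k, k < m → k < n → p k = q k) :
    (List.range m).countP p = (List.range n).countP q := by
  rcases le_total n m with h | h
  · rw [pvCountP_range_of_le p m n h hp]
    exact List.countP_congr (fun k hk => by
      have hkn := List.mem_range.mp hk
      rw [hpq k (by omega) hkn])
  · rw [pvCountP_range_of_le q n m h hq]
    exact List.countP_congr (fun k hk => by
      have hkm := List.mem_range.mp hk
      rw [hpq k hkm (by omega)])

-- B's bucket for value v, characterised through the grouping-loop lemma
theorem pvBucket_getD (assignment : List Int) (v : Int) :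
    ((PySem.List.enumerate assignment).foldl
        (fun d p => d.modify p.2 [] (fun l => l ++ [p.1])) PySem.Dict.empty).getD v []
    = (((PySem.List.enumerate assignment).map Prod.swap).filter
        (fun p => p.1 == v)).map (fun p => p.2) := by
  have hfold : (PySem.List.enumerate assignment).foldl
        (fun d p => d.modify p.2 [] (fun l => l ++ [p.1])) PySem.Dict.empty
      = ((PySem.List.enumerate assignment).map Prod.swap).foldl
        (fun d p => d.modify p.1 [] (fun l => l ++ [p.2])) PySem.Dict.empty := by
    rw [List.foldl_map]
    rfl
  rw [hfold, PySem.Dict.getD_foldl_modify_append]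
  simp

-- A's per-row conflict count as a countP over column indices
def pvCntA (assignment row : List Int) (i : Int) : Int :=
  (PySem.List.pyRange 0 (row.length : Int) 1).foldl
    (fun c j =>
      if PySem.List.pyGetD row j 0 = 1 ∧
         PySem.List.pyGetD assignment i 0 = PySem.List.pyGetD assignment j 0
      then c + 1 else c) 0

-- B's per-row conflict count (bucket scan)
def pvCntB (assignment row : List Int) (i : Int) : Int :=
  (((PySem.List.enumerate assignment).foldl
      (fun d p => d.modify p.2 [] (fun l => l ++ [p.1])) PySem.Dict.empty).getD
        (PySem.List.pyGetD assignment i 0) []).foldl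
    (fun c j => if j < (row.length : Int) ∧ PySem.List.pyGetD row j 0 = 1 then c + 1 else c) 0

-- the two counts agree whenever every 1-entry's column and the row itself have an assignment
theorem pvCnt_eq (assignment row : List Int) (i : Int)
    (hrow : ∀ j < row.length, row.getD j 0 = 1 → j < assignment.length) :
    pvCntA assignment row i = pvCntB assignment row i := by
  unfold pvCntA pvCntB
  rw [pvBucket_getD]
  rw [PySem.List.foldl_ite_add_one
        (fun j => PySem.List.pyGetD row j 0 = 1 ∧
          PySem.List.pyGetD assignment i 0 = PySem.List.pyGetD assignment j 0)]
  rw [PySem.List.foldl_ite_add_one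
        (fun j => j < (row.length : Int) ∧ PySem.List.pyGetD row j 0 = 1)]
  rw [PySem.List.enumerate_eq_map_pyRange assignment 0]
  simp only [List.map_map, List.countP_map, List.countP_filter, PySem.List.len_eq]
  rw [PySem.List.pyRange_one 0 (row.length : Int), PySem.List.pyRange_one 0 (assignment.length : Int)]
  simp only [List.countP_map, Int.sub_zero, Int.toNat_natCast]
  simp only [zero_add]
  congr 1
  apply pvCountP_range_congr
  · intro k hk
    simp only [Function.comp, PySem.List.pyGetD_natCast, decide_eq_true_eq] at hk
    by_cases hkr : k < row.length
    · exact hrow k hkr hk.1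
    · exfalso
      rw [List.getD_eq_default _ _ (by omega : row.length ≤ k)] at hk
      have := hk.1
      omega
  · intro k hk
    simp only [Function.comp, PySem.List.pyGetD_natCast, Prod.swap, decide_eq_true_eq,
      Bool.and_eq_true, Nat.cast_lt] at hk
    exact hk.1.1
  · intro k hkr hka
    simp only [Function.comp, PySem.List.pyGetD_natCast, Prod.swap]
    by_cases h2 : PySem.List.pyGetD assignment i 0 = assignment[k]?.getD 0
    · simp [hkr, h2]
    · simp [hkr, h2]
      exact fun _ h => h2 h.symm

-- A's and B's final selectors, named for the proofs
def pvSel (l : List (Int × Int)) : Int :=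
  if l.length > 0 then
    (match PySem.List.max? l (fun p => p.2) with
     | some p => p.1
     | none => -1)
  else -1

def pvSelB (cs : List Int) : Int :=
  match PySem.List.max? cs (fun x => x) with
  | none => -1
  | some m =>
    match PySem.List.index? cs m with
    | none => -1
    | some k => (k : Int)

theorem pvA_char (a : List Int) (m : List (List Int)) :
    max_conflicts_variable a m
      = pvSel ((PySem.List.pyRange 0 (m.length : Int) 1).map
          (fun i => (i, pvCntA a (PySem.List.pyGetD m i []) i))) := by
  unfold max_conflicts_variable pvSel pvCntA
  rw [PySem.List.foldl_append_singleton_eq_map]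
  rfl

theorem pvB_char (a : List Int) (m : List (List Int)) :
    max_conflicts_variable_alt a m = if m = [] then -1 else
      pvSelB ((PySem.List.pyRange 0 (m.length : Int) 1).map
        (fun i => pvCntB a (PySem.List.pyGetD m i []) i)) := by
  unfold max_conflicts_variable_alt pvSelB pvCntB
  by_cases hm : m = []
  · simp [hm]
  · rw [if_neg hm, if_neg hm]
    simp only [PySem.List.foldl_append_singleton_eq_map, List.nil_append]

-- the two selectors agree on any nonempty counts sequence
theorem pvSel_eq (c : Int → Int) (n : Nat) (hn : 0 < n) :
    pvSel ((PySem.List.pyRange 0 (n : Int) 1).map (fun i => (i, c i))) =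
    pvSelB ((PySem.List.pyRange 0 (n : Int) 1).map c) := by
  set cs := (PySem.List.pyRange 0 (n : Int) 1).map c with hcs
  have hlen : cs.length = n := by
    simp [hcs, PySem.List.length_pyRange_one]
  have hpairs : (PySem.List.pyRange 0 (n : Int) 1).map (fun i => (i, c i))
      = PySem.List.enumerate cs := by
    rw [PySem.List.enumerate_eq_map_pyRange cs 0]
    simp only [PySem.List.len_eq, hlen]
    apply List.map_congr_left
    intro i hi
    rw [PySem.List.mem_pyRange_one] at hi
    rw [hcs, PySem.List.pyGetD_map_pyRange_of_nonneg c _ _ _ hi.1 hi.2]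
  rw [hpairs]
  obtain ⟨c0, t, hct⟩ : ∃ c0 t, cs = c0 :: t := by
    cases hc : cs with
    | nil => rw [hc] at hlen; simp at hlen; omega
    | cons c0 t => exact ⟨c0, t, rfl⟩
  rw [hct]
  show pvSel (PySem.List.enumerate (c0 :: t) 0) = pvSelB (c0 :: t)
  have hmem : t.foldl max c0 ∈ c0 :: t := by
    rcases pvFoldlMax_mem t c0 with h | h
    · rw [h]; exact List.mem_cons_self
    · exact List.mem_cons_of_mem _ h
  rw [PySem.List.enumerate_cons]
  have hA : pvSel ((0, c0) :: PySem.List.enumerate t (0 + 1)) =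
      (List.foldl pvStep (0, c0) (PySem.List.enumerate t (0 + 1))).1 := by
    simp [pvSel, pvMax?_cons]
  have hB : pvSelB (c0 :: t) = ((List.idxOf (t.foldl max c0) (c0 :: t) : Nat) : Int) := by
    simp [pvSelB, PySem.List.max?_id_cons, PySem.List.index?_eq_idxOf?,
      pvIdxOf?_of_mem _ _ hmem]
  rw [hA, hB, pvFoldF t (0 + 1) 0 c0]
  have hc0 := (PySem.List.le_foldl_max t c0).1
  rw [List.idxOf_cons]
  by_cases hle : t.foldl max c0 ≤ c0
  · have heq : c0 = t.foldl max c0 := le_antisymm hc0 hle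
    rw [if_pos hle, show (c0 == t.foldl max c0) = true from by simp [← heq]]
    simp
  · have hne : (c0 == t.foldl max c0) = false := by
      simp only [beq_eq_false_iff_ne, ne_eq]
      omega
    rw [if_neg hle, hne]
    simp only [cond_false]
    omega


theorem max_conflicts_variable_spec : Claim_equal_max_conflicts_variable := by
  intro a matrix _ hpre
  obtain ⟨hlen, hentries⟩ := hpre
  unfold Spec_max_conflicts_variable
  rw [pvA_char, pvB_char]
  by_cases hm : matrix = []
  · subst hm
    simp [pvSel, PySem.List.pyRange_one]
  · rw [if_neg hm]
    have hmap : (PySem.List.pyRange 0 (matrix.length : Int) 1).map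
        (fun i => (i, pvCntA a (PySem.List.pyGetD matrix i []) i))
      = (PySem.List.pyRange 0 (matrix.length : Int) 1).map
        (fun i => (i, pvCntB a (PySem.List.pyGetD matrix i []) i)) := by
      apply List.map_congr_left
      intro i hi
      rw [PySem.List.mem_pyRange_one] at hi
      have hilt : i.toNat < matrix.length := by omega
      have hrow : PySem.List.pyGetD matrix i [] = matrix.getD i.toNat [] := by
        rw [PySem.List.pyGetD_eq_getElem matrix [] hi.1 (by exact_mod_cast hi.2)]
        rw [List.getD_eq_getElem _ _ hilt]
      congr 1
      apply pvCnt_eq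
      simp only [hrow]
      exact hentries i.toNat hilt
    rw [hmap]
    exact pvSel_eq (fun i => pvCntB a (PySem.List.pyGetD matrix i []) i) matrix.length
      (by cases matrix with
          | nil => exact absurd rfl hm
          | cons r t => exact Nat.succ_pos _)
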